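-- pv_equiv track=rewrite | github.com/jeromedeshaie-blip/mcva-audit | jobs/collector.py | detect_citation
-- ===== SOURCE A (Python) =====
-- def detect_citation(response, client_name, keywords=None):
--     """
--     Détecte si le client est cité dans la réponse LLM.
--     Retourne (cited, rank, snippet).
--     """
--     response_lower = response.lower()
--     search_terms = [client_name.lower()] + [k.lower() for k in (keywords or [])]
--
--     lines = response.split("\n")
--     for i, line in enumerate(lines):
--         for term in search_terms:
--             if term in line.lower():
--                 rank = None
--                 for j, prev_line in enumerate(lines[: i + 1]):
--                     if any(
--                         prev_line.strip().startswith(f"{n}.")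
--                         or prev_line.strip().startswith(f"{n})")
--                         for n in range(1, 6)
--                     ):
--                         if term in prev_line.lower():
--                             rank = int(prev_line.strip()[0])
--                             break
--                 snippet = line.strip()[:300]
--                 return True, rank, snippet
--
--     return False, None, None
-- ===== SOURCE B (Python) =====
-- def detect_citation(response, client_name, keywords=None):
--     """Single pass: rank is computed directly from the first matching line —
--     no earlier line can contain a term, so A's backward scan is vacuous."""
--     terms = [client_name.lower()] + [k.lower() for k in (keywords or [])]
--     for line in response.split("\n"):
--         low = line.lower()
--         if any(t in low for t in terms):
--             s = line.strip()
--             rank = None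
--             if any(s.startswith(f"{n}.") or s.startswith(f"{n})") for n in range(1, 6)):
--                 rank = int(s[0])
--             return True, rank, s[:300]
--     return False, None, None
-- ===== Notes on version B (the rewrite author's own statement) =====
-- stated objective: simpler
-- what changed: Replaced A's per-match backward scan over lines[:i+1] (looking for a numbered line containing the term) by computing the rank directly from the first matching line, which is provably the only line the scan can fire on; one flat pass instead of nested passes.
import Mathlib
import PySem

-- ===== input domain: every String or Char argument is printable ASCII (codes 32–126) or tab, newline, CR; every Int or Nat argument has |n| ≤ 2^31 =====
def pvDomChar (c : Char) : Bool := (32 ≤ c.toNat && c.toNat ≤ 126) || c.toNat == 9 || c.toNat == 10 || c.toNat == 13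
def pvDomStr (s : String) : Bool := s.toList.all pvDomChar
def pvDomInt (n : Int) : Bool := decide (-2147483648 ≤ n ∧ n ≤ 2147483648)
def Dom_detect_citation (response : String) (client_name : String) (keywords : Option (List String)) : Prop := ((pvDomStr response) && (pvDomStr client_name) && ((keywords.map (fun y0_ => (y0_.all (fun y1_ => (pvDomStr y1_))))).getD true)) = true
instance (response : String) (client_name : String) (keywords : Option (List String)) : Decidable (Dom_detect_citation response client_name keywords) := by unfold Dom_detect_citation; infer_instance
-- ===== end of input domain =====

-- B replaces A's nested backward scan over lines[:i+1] by reading the rank off the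
-- first matching line itself (the scan is provably vacuous on earlier lines): simpler, one flat pass.

-- helper shared by both ports: the f"{n}." / f"{n})" numbered-prefix test, n in range(1,6)
def pvNumbered (s : String) : Bool :=
  (PySem.List.pyRange 1 6 1).any fun n =>
    PySem.Str.startswith s (PySem.Int.toStr n ++ ".") || PySem.Str.startswith s (PySem.Int.toStr n ++ ")")

-- helper shared by both ports: int(s[0])  (only reached when pvNumbered holds, so it never fails)
def pvDigitInt (s : String) : Option Int :=
  (PySem.Str.pyGet? s 0).bind fun c => PySem.Int.ofStr? (String.ofList [c])

-- ===== PORT A =====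
-- inner loop: for j, prev_line in enumerate(lines[:i+1]): if numbered: if term in prev.lower(): rank=int(...); break
def pvARank (prevs : List String) (term : String) : Option Int :=
  match prevs with
  | [] => none
  | p :: rest =>
    if pvNumbered (PySem.Str.strip p) then
      if PySem.Str.isIn term (PySem.Str.lower p) then pvDigitInt (PySem.Str.strip p)
      else pvARank rest term
    else pvARank rest term

-- outer loop: for i, line in enumerate(lines): for term in search_terms: if term in line.lower(): … return
def pvALoop (lines : List String) (terms : List String) : Nat → List String → Bool × Option Int × Option String
  | _, [] => (false, none, none)
  | i, line :: rest =>
    match terms.find? (fun term => PySem.Str.isIn term (PySem.Str.lower line)) with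
    | some term =>
      let rank := pvARank (PySem.List.slice lines none (some ((i : Int) + 1))) term
      let snippet := PySem.Str.slice (PySem.Str.strip line) none (some 300)
      (true, rank, some snippet)
    | none => pvALoop lines terms (i + 1) rest

def detect_citation (response : String) (client_name : String) (keywords : Option (List String)) : Bool × Option Int × Option String :=
  let _response_lower := PySem.Str.lower response   -- computed but unused, as in A
  let search_terms := PySem.Str.lower client_name :: (keywords.getD []).map PySem.Str.lower
  let lines := (PySem.Chars.splitOn response.toList ['\n']).map String.ofList   -- s.split("\n"), sep nonempty: exact
  pvALoop lines search_terms 0 lines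

-- ===== PORT B =====
def pvBFind (terms : List String) : List String → Bool × Option Int × Option String
  | [] => (false, none, none)
  | line :: rest =>
    let low := PySem.Str.lower line
    if terms.any (fun t => PySem.Str.isIn t low) then
      let s := PySem.Str.strip line
      let rank := if pvNumbered s then pvDigitInt s else none
      (true, rank, some (PySem.Str.slice s none (some 300)))
    else pvBFind terms rest

def detect_citation_alt (response : String) (client_name : String) (keywords : Option (List String)) : Bool × Option Int × Option String :=
  let terms := PySem.Str.lower client_name :: (keywords.getD []).map PySem.Str.lower
  pvBFind terms ((PySem.Chars.splitOn response.toList ['\n']).map String.ofList)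

-- ===== PRECONDITION & SPEC =====
def Spec_detect_citation (response : String) (client_name : String) (keywords : Option (List String)) (out : Bool × Option Int × Option String) : Prop := out = detect_citation_alt response client_name keywords
instance (response : String) (client_name : String) (keywords : Option (List String)) (out : Bool × Option Int × Option String) : Decidable (Spec_detect_citation response client_name keywords out) := by unfold Spec_detect_citation; infer_instance

-- ===== CLAIM (what is proved, stated in full; the proofs are below) =====
def Claim_equal_detect_citation : Prop := ∀ (response : String) (client_name : String) (keywords : Option (List String)), Dom_detect_citation response client_name keywords → Spec_detect_citation response client_name keywords (detect_citation response client_name keywords)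

-- ===== LEMMAS AND PROOFS =====

-- lines that contain no occurrence of `term` are skipped by A's inner scan
theorem pvARank_skip (consumed : List String) (l : List String) (term : String)
    (h : ∀ p ∈ consumed, PySem.Str.isIn term (PySem.Str.lower p) = false) :
    pvARank (consumed ++ l) term = pvARank l term := by
  induction consumed with
  | nil => rfl
  | cons p rest ih =>
    have hp := h p (by simp)
    simp only [List.cons_append, pvARank, hp]
    split <;> exact ih (fun q hq => h q (by simp [hq]))

theorem pv_take_len (consumed : List String) (a : String) (r : List String) :
    (consumed ++ a :: r).take (consumed.length + 1) = consumed ++ [a] := by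
  induction consumed with
  | nil => rfl
  | cons p rest ih => simp [ih]

-- main invariant: once no term occurs in any consumed line, A's loop agrees with B's
theorem pvALoop_eq_pvBFind (terms : List String) (rest consumed : List String)
    (h : ∀ p ∈ consumed, ∀ t ∈ terms, PySem.Str.isIn t (PySem.Str.lower p) = false) :
    pvALoop (consumed ++ rest) terms consumed.length rest = pvBFind terms rest := by
  induction rest generalizing consumed with
  | nil => rfl
  | cons line rest' ih =>
    cases hf : terms.find? (fun term => PySem.Str.isIn term (PySem.Str.lower line)) with
    | none =>
      have hall : ∀ t ∈ terms, PySem.Chars.isIn t.toList (PySem.Chars.lower line.toList) = false := by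
        intro t ht
        have := List.find?_eq_none.mp hf t ht
        simpa using this
      have hany : terms.any (fun t => PySem.Str.isIn t (PySem.Str.lower line)) = false := by
        simp only [List.any_eq_false]
        intro t ht; simpa using hall t ht
      have h' : ∀ p ∈ consumed ++ [line], ∀ t ∈ terms,
          PySem.Str.isIn t (PySem.Str.lower p) = false := by
        intro p hp t ht
        rcases List.mem_append.mp hp with hc | hl
        · exact h p hc t ht
        · simp only [List.mem_singleton] at hl; subst hl; simpa using hall t ht
      have := ih (consumed ++ [line]) h'
      simp only [List.append_assoc, List.singleton_append, List.length_append,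
        List.length_singleton] at this
      simp only [pvALoop, hf, pvBFind, hany]
      exact this
    | some term =>
      have hmem : term ∈ terms := List.mem_of_find?_eq_some hf
      have hterm : PySem.Chars.isIn term.toList (PySem.Chars.lower line.toList) = true := by
        have := List.find?_some hf; simpa using this
      have hany : terms.any (fun t => PySem.Str.isIn t (PySem.Str.lower line)) = true :=
        List.any_eq_true.mpr ⟨term, hmem, by simpa using hterm⟩
      have hslice : PySem.List.slice (consumed ++ line :: rest') none
          (some ((consumed.length : Int) + 1)) = consumed ++ [line] := by
        have : ((consumed.length : Int) + 1) = ((consumed.length + 1 : Nat) : Int) := by push_cast; ring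
        rw [this, PySem.List.slice_to_natCast, pv_take_len]
      have hrank : pvARank (consumed ++ [line]) term
          = if pvNumbered (PySem.Str.strip line) then pvDigitInt (PySem.Str.strip line) else none := by
        rw [pvARank_skip consumed [line] term (fun p hp => h p hp term hmem)]
        simp only [pvARank]
        split <;> simp [hterm]
      simp only [pvALoop, hf, pvBFind, hany, if_pos, hslice, hrank]

theorem detect_citation_eq (response client_name : String) (keywords : Option (List String)) :
    detect_citation response client_name keywords = detect_citation_alt response client_name keywords := by
  unfold detect_citation detect_citation_alt
  exact pvALoop_eq_pvBFind _ _ [] (by simp)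

-- ===== VERDICT (by name: the statement is the Claim_ definition above) =====
theorem detect_citation_spec : Claim_equal_detect_citation := by
  intro response client_name keywords _
  exact detect_citation_eq response client_name keywords
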